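-- pv_equiv track=rewrite | github.com/eoinclancy1/pythonChallenges | telnyx_palindrome.py | get_palindrome_using_bases
-- ===== SOURCE A (Python) =====
-- def palindromeCheck(x):
--     """
--     Check that x is read the same both forwards and backwards
--     input: x of type int or string
--     output: boolean
--     """
--
--     str_x = str(x)
--     return str_x == str_x[::-1]
--
-- def convert_to_base(num, base):
--     """
--     Covert number to specified base
--     input: num as int
--            base as int
--     output: num to base as string
--     """
--
--     if num < base:
--         return num
--
--     dividing = True
--     result = []
--     quotient = num
--
--     while dividing:
--
--         rem = quotient % base
--         quotient = quotient // base
--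
--         result.append(rem)
--
--         if quotient == base:
--             result.append(0)
--             result.append(1)
--             dividing = False
--         elif quotient < base:
--             result.append(quotient)
--             dividing = False
--
--     return ''.join(str(n) for n in result[::-1])
--
-- def get_palindrome_using_bases(start, end):
--     """
--     Specify range of number for which to find the smallest base
--          in which each individual number is a palindrome
--     input: start as int - first number in range to use
--            end as int - last number in range to use
--     output: list of dictionaries of form
--             {'decimal' : n,
--             'smallest base in which the number is a palindrome' : b}
--     """
--
--     answers = []
--
--     for n in range(start, end+1):
--
--         b = 1
--         converged = False
--         while not converged:
--             b = b + 1
--             val = convert_to_base(n, b)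
--             converged = palindromeCheck(val)
--
--         answers.append({'decimal' : n, 'smallest base in which the number is a palindrome' : b})
--     return answers
-- ===== SOURCE B (Python) =====
-- def get_palindrome_using_bases(start, end):
--     """Same results as the original, computed region by region: full digit
--     extraction only while b*b <= n; above that the base-b representation has
--     at most two digits, read off with a single divmod (or str(n) once b > n)."""
--     return [{'decimal': n,
--              'smallest base in which the number is a palindrome':
--              _smallest_pal_base(n)}
--             for n in range(start, end + 1)]
--
--
-- def _smallest_pal_base(n):
--     b = 2
--     # region 1: representation has 3+ digits; build it digit by digit
--     while b * b <= n:
--         parts = []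
--         q = n
--         while q >= b:
--             parts.append(str(q % b))
--             q //= b
--         parts.append(str(q))
--         s = ''.join(reversed(parts))
--         if s == s[::-1]:
--             return b
--         b += 1
--     # region 2: at most two digits per base: one divmod, no digit loop
--     while True:
--         s = str(n) if n < b else str(n // b) + str(n % b)
--         if s == s[::-1]:
--             return b
--         b += 1
-- ===== Notes on version B (the rewrite author's own statement) =====
-- stated objective: alternative
-- what changed: Per number, B splits the base scan into regions: the general digit-extraction loop runs only while b*b <= n, and for every larger base the two-digit representation is read off with a single divmod (str(n) once b > n), instead of A's full conversion loop with string join per base; the outer loop is a comprehension.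
import Mathlib
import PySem

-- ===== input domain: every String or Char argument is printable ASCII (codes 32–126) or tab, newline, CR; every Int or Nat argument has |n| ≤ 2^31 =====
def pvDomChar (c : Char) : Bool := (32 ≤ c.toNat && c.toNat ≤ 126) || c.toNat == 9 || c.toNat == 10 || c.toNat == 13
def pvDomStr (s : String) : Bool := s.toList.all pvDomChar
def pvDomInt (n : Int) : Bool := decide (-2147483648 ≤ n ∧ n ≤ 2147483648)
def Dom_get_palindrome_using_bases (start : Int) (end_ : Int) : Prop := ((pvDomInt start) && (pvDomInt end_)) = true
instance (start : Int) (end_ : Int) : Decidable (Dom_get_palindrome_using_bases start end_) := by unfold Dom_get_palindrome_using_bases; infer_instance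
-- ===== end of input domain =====

-- B scans the same bases but splits the scan into regions: the general conversion loop only
-- while b*b <= n, one divmod per base above that (alternative decomposition, same results).
-- Strings are handled on the List Char side (PySem.Chars).

-- ===== PORT A =====

-- palindromeCheck: str_x == str_x[::-1]; s[::-1] is reverse (PySem.List.slice?_none_none_neg_one)
def pvA_palCheck (x : List Char) : Bool := x == x.reverse

-- the 'while dividing' loop of convert_to_base; fuel makes it total (exhaustion unreachable for base ≥ 2)
def pvA_convLoop (base : Int) : Nat → Int → List Int → List Int
  | 0, _, result => result
  | f+1, quotient, result =>
      let rem := PySem.Int.mod quotient base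
      let q := PySem.Int.floordiv quotient base
      let result := result ++ [rem]
      if q = base then result ++ [0, 1]
      else if q < base then result ++ [q]
      else pvA_convLoop base f q result

-- convert_to_base; the num < base branch returns num, read as str(num) by palindromeCheck
def pvA_convert (num base : Int) : List Char :=
  if num < base then PySem.Int.toChars num
  else PySem.Chars.join [] ((pvA_convLoop base (num.toNat + 2) num []).reverse.map PySem.Int.toChars)

-- the 'while not converged' loop; fuel n+3 covers the answer bound (pal at base n-1 for n ≥ 3)
def pvA_search (n : Int) : Nat → Int → Int
  | 0, b => b + 1
  | f+1, b =>
      let b' := b + 1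
      if pvA_palCheck (pvA_convert n b') then b' else pvA_search n f b'

def get_palindrome_using_bases (start : Int) (end_ : Int) : List (List (String × Int)) :=
  (PySem.List.pyRange start (end_ + 1) 1).foldl
    (fun answers n =>
      answers ++ [[("decimal", n),
                   ("smallest base in which the number is a palindrome",
                    pvA_search n (n.toNat + 3) 1)]]) []

-- ===== PORT B =====

-- the inner digit loop of region 1 (while q >= b), plus the final append of str(q)
def pvB_digLoop (b : Int) : Nat → Int → List (List Char) → List (List Char)
  | 0, _, parts => parts
  | f+1, q, parts =>
      if b ≤ q then
        pvB_digLoop b f (PySem.Int.floordiv q b) (parts ++ [PySem.Int.toChars (PySem.Int.mod q b)])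
      else parts ++ [PySem.Int.toChars q]

-- region 2: at most two digits per base (fuel totalises the while True; unreachable for n ≥ 0)
def pvB_region2 (n : Int) : Nat → Int → Int
  | 0, b => b
  | f+1, b =>
      let s := if n < b then PySem.Int.toChars n
               else PySem.Int.toChars (PySem.Int.floordiv n b) ++ PySem.Int.toChars (PySem.Int.mod n b)
      if s == s.reverse then b else pvB_region2 n f (b + 1)

-- region 1: while b * b <= n, full digit extraction; then hand over to region 2
def pvB_region1 (n : Int) : Nat → Int → Int
  | 0, b => b
  | f+1, b =>
      if b * b ≤ n then
        let s := PySem.Chars.join [] ((pvB_digLoop b (n.toNat + 2) n []).reverse)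
        if s == s.reverse then b else pvB_region1 n f (b + 1)
      else pvB_region2 n (f+1) b

def get_palindrome_using_bases_alt (start : Int) (end_ : Int) : List (List (String × Int)) :=
  (PySem.List.pyRange start (end_ + 1) 1).map
    (fun n => [("decimal", n),
               ("smallest base in which the number is a palindrome",
                pvB_region1 n (n.toNat + 3) 2)])

-- ===== PRECONDITION & SPEC =====
-- Pre_ excludes only non-empty ranges starting below 0: on any negative n the Python A never
-- terminates (convert_to_base returns n itself for every base and str(n) is never a palindrome).
def Pre_get_palindrome_using_bases (start : Int) (end_ : Int) : Prop := end_ < start ∨ 0 ≤ start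
instance (start : Int) (end_ : Int) : Decidable (Pre_get_palindrome_using_bases start end_) := by
  unfold Pre_get_palindrome_using_bases; infer_instance

def pvWitness_get_palindrome_using_bases : Int × Int := (2, 7)

def Spec_get_palindrome_using_bases (start : Int) (end_ : Int) (out : List (List (String × Int))) : Prop := out = get_palindrome_using_bases_alt start end_
instance (start : Int) (end_ : Int) (out : List (List (String × Int))) : Decidable (Spec_get_palindrome_using_bases start end_ out) := by unfold Spec_get_palindrome_using_bases; infer_instance

-- ===== CLAIM (what is proved, stated in full; the proofs are below) =====
def Claim_equal_get_palindrome_using_bases : Prop := ∀ (start : Int) (end_ : Int), Dom_get_palindrome_using_bases start end_ → Pre_get_palindrome_using_bases start end_ → Spec_get_palindrome_using_bases start end_ (get_palindrome_using_bases start end_)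

-- ===== LEMMAS AND PROOFS =====

-- A's conversion loop and B's digit loop build the same digit list (B holds it as strings).
lemma pv_loop_rel (b : Int) (hb : 2 ≤ b) :
    ∀ (m fa fb : Nat) (q : Int) (acc : List Int), q.toNat = m → b ≤ q →
      q.toNat ≤ fa → q.toNat ≤ fb →
      pvB_digLoop b fb q (acc.map PySem.Int.toChars) =
        (pvA_convLoop b fa q acc).map PySem.Int.toChars := by
  intro m
  induction m using Nat.strong_induction_on with
  | _ m ih =>
    intro fa fb q acc hm hbq hfa hfb
    have hbpos : (0:Int) < b := by omega
    have hq2 : (2:Int) ≤ q := le_trans hb hbq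
    have hqt : 2 ≤ q.toNat := by omega
    obtain ⟨fa', rfl⟩ : ∃ fa', fa = fa' + 1 := ⟨fa - 1, by omega⟩
    obtain ⟨fb', rfl⟩ : ∃ fb', fb = fb' + 1 := ⟨fb - 1, by omega⟩
    have hq1 : (1:Int) ≤ PySem.Int.floordiv q b :=
      (PySem.Int.le_floordiv_iff_mul_le hbpos).2 (by omega)
    have hqlt : PySem.Int.floordiv q b < q :=
      (PySem.Int.floordiv_lt_iff_lt_mul hbpos).2 (by nlinarith)
    simp only [pvA_convLoop, pvB_digLoop, if_pos hbq]
    by_cases he : PySem.Int.floordiv q b = b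
    · -- q // b == base: A appends [0, 1]; B takes two more loop steps (digits 0 then 1)
      rw [if_pos he]
      have hbb : b * b ≤ q := by
        have := (PySem.Int.le_floordiv_iff_mul_le hbpos).1 (le_of_eq he.symm)
        omega
      have hq4 : 4 ≤ q.toNat := by nlinarith [Int.toNat_of_nonneg (by omega : (0:Int) ≤ q)]
      obtain ⟨fb'', rfl⟩ : ∃ fb'', fb' = fb'' + 1 := ⟨fb' - 1, by omega⟩
      obtain ⟨fb3, rfl⟩ : ∃ fb3, fb'' = fb3 + 1 := ⟨fb'' - 1, by omega⟩
      have hdb : PySem.Int.floordiv b b = 1 :=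
        (PySem.Int.floordiv_eq_iff_of_pos hbpos).2 ⟨by omega, by omega⟩
      have hmb : PySem.Int.mod b b = 0 := by
        have := PySem.Int.floordiv_mul_add_mod b b
        rw [hdb] at this; omega
      rw [he]
      simp only [pvB_digLoop, if_pos (le_refl b), hdb, hmb, if_neg (by omega : ¬ b ≤ (1:Int))]
      simp
    · rw [if_neg he]
      by_cases hlt : PySem.Int.floordiv q b < b
      · -- quotient dropped below the base: both loops finish
        rw [if_pos hlt]
        obtain ⟨fb'', rfl⟩ : ∃ fb'', fb' = fb'' + 1 := ⟨fb' - 1, by omega⟩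
        simp only [pvB_digLoop, if_neg (by omega : ¬ b ≤ PySem.Int.floordiv q b)]
        simp
      · rw [if_neg hlt]
        have hble : b ≤ PySem.Int.floordiv q b := by omega
        have hrec := ih (PySem.Int.floordiv q b).toNat (by omega) fa' fb'
          (PySem.Int.floordiv q b) (acc ++ [PySem.Int.mod q b]) rfl hble (by omega) (by omega)
        simpa using hrec

-- region-2 bases (b ≤ n < b*b): A's convert string is the one-divmod string
lemma pv_conv2 (n b : Int) (hb : 2 ≤ b) (hl : b ≤ n) (h : n < b * b) :
    pvA_convert n b =
      PySem.Int.toChars (PySem.Int.floordiv n b) ++ PySem.Int.toChars (PySem.Int.mod n b) := by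
  have hbpos : (0:Int) < b := by omega
  have hqlt : PySem.Int.floordiv n b < b := (PySem.Int.floordiv_lt_iff_lt_mul hbpos).2 h
  unfold pvA_convert
  rw [if_neg (by omega)]
  have h2 : n.toNat + 2 = Nat.succ (n.toNat + 1) := rfl
  rw [h2]
  simp only [pvA_convLoop]
  rw [if_neg (by omega), if_pos hqlt]
  simp [PySem.Chars.join_cons_cons, PySem.Chars.join_singleton]

-- region-1 bases (b*b ≤ n): A's convert string equals B's joined digit string
lemma pv_conv1 (n b : Int) (hb : 2 ≤ b) (h : b * b ≤ n) :
    pvA_convert n b = PySem.Chars.join [] ((pvB_digLoop b (n.toNat + 2) n []).reverse) := by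
  have hbn : b ≤ n := by nlinarith
  have hloop := pv_loop_rel b hb n.toNat (n.toNat + 2) (n.toNat + 2) n [] rfl hbn
    (by omega) (by omega)
  unfold pvA_convert
  rw [if_neg (by omega)]
  simp only [List.map_nil] at hloop
  rw [hloop, List.map_reverse]

-- once (b+1)^2 > n, A's scan coincides with B's region-2 scan
lemma pv_search2 (n : Int) :
    ∀ (f : Nat) (b : Int), 1 ≤ b → n < (b + 1) * (b + 1) →
      pvA_search n f b = pvB_region2 n f (b + 1) := by
  intro f
  induction f with
  | zero => intro b hb hlt; simp [pvA_search, pvB_region2]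
  | succ f ih =>
    intro b hb hlt
    have hval : pvA_convert n (b + 1) =
        (if n < b + 1 then PySem.Int.toChars n
         else PySem.Int.toChars (PySem.Int.floordiv n (b+1)) ++
              PySem.Int.toChars (PySem.Int.mod n (b+1))) := by
      by_cases hc : n < b + 1
      · rw [if_pos hc]; unfold pvA_convert; rw [if_pos hc]
      · rw [if_neg hc]; exact pv_conv2 n (b+1) (by omega) (by omega) hlt
    simp only [pvA_search, pvB_region2, pvA_palCheck, hval]
    split
    · split
      · rfl
      · rw [ih (b+1) (by omega) (by nlinarith)]
    · split
      · rfl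
      · rw [ih (b+1) (by omega) (by nlinarith)]

-- A's scan from base b+1 equals B's region-1 scan (which hands over to region 2)
lemma pv_search1 (n : Int) :
    ∀ (f : Nat) (b : Int), 1 ≤ b →
      pvA_search n f b = pvB_region1 n f (b + 1) := by
  intro f
  induction f with
  | zero => intro b hb; simp [pvA_search, pvB_region1]
  | succ f ih =>
    intro b hb
    by_cases h : (b + 1) * (b + 1) ≤ n
    · have hval := pv_conv1 n (b+1) (by omega) h
      simp only [pvA_search, pvB_region1, if_pos h, pvA_palCheck, hval]
      split
      · rfl
      · exact ih (b+1) (by omega)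
    · have := pv_search2 n (f+1) b hb (by omega)
      simp only [pvB_region1, if_neg h]
      exact this

-- ===== VERDICT (by name: the statement is the Claim_ definition above) =====
theorem get_palindrome_using_bases_spec : Claim_equal_get_palindrome_using_bases := by
  intro start end_ _hdom hpre
  unfold Spec_get_palindrome_using_bases get_palindrome_using_bases get_palindrome_using_bases_alt
  rw [PySem.List.foldl_append_singleton_eq_map, List.nil_append]
  refine List.map_congr_left ?_
  intro n hn
  rcases hpre with h | h
  · rw [PySem.List.pyRange_one_eq_nil (by omega)] at hn; cases hn
  · have hmem := (PySem.List.mem_pyRange_one).1 hn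
    rw [pv_search1 n (n.toNat + 3) 1 (by omega)]
    norm_num
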